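-- pv_equiv track=rewrite | github.com/fhabili/business_systems_lifecycle | backend/src/app/ingest/bis_lbs.py | _build_col_labels
-- ===== SOURCE A (Python) =====
-- def _build_col_labels(header_rows: list[list[str]]) -> list[tuple[str, str] | None]:
--     """
--     Build (sector_type, position_type) label for each data column (index 1+)
--     from three header rows [sector_group_row, subgroup_row, claims_liabilities_row].
--     Returns a list aligned to column positions starting at index 1.
--     None entries indicate columns without a usable Claims/Liabilities label.
--     """
--     sector_row   = header_rows[0] if len(header_rows) > 0 else []
--     subgroup_row = header_rows[1] if len(header_rows) > 1 else []
--     position_row = header_rows[2] if len(header_rows) > 2 else []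
--
--     max_len = max(len(sector_row), len(subgroup_row), len(position_row))
--     labels: list[tuple[str, str] | None] = []
--     current_sector   = ""
--     current_subgroup = ""
--
--     for i in range(1, max_len):  # col 0 = country/category identifier
--         s  = sector_row[i].strip()   if i < len(sector_row)   else ""
--         sg = subgroup_row[i].strip() if i < len(subgroup_row) else ""
--         p  = position_row[i].strip() if i < len(position_row) else ""
--
--         if s:
--             current_sector   = s
--             current_subgroup = ""
--         if sg:
--             current_subgroup = sg
--
--         if p in ("Claims", "Liabilities"):
--             sec = f"{current_sector} — {current_subgroup}".strip(" —") if current_subgroup else current_sector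
--             labels.append((sec, p))
--         else:
--             labels.append(None)
--
--     return labels
-- ===== SOURCE B (Python) =====
-- def _cell(row, i):
--     return row[i].strip() if 0 <= i < len(row) else ""
--
--
-- def _last_nonempty(row, hi, lo):
--     """Largest index k in [lo, hi] with a non-empty stripped cell, else None."""
--     return next((k for k in range(hi, lo - 1, -1) if _cell(row, k)), None)
--
--
-- def _build_col_labels(header_rows: list[list[str]]) -> list[tuple[str, str] | None]:
--     sector_row   = header_rows[0] if len(header_rows) > 0 else []
--     subgroup_row = header_rows[1] if len(header_rows) > 1 else []
--     position_row = header_rows[2] if len(header_rows) > 2 else []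
--     max_len = max(len(sector_row), len(subgroup_row), len(position_row))
--
--     def label(i):
--         p = _cell(position_row, i)
--         if p not in ("Claims", "Liabilities"):
--             return None
--         j = _last_nonempty(sector_row, i, 1)
--         cs = _cell(sector_row, j) if j is not None else ""
--         lo = j if j is not None else 1
--         k = _last_nonempty(subgroup_row, i, lo)
--         csg = _cell(subgroup_row, k) if k is not None else ""
--         sec = f"{cs} — {csg}".strip(" —") if csg else cs
--         return (sec, p)
--
--     return [label(i) for i in range(1, max_len)]
-- ===== Notes on version B (the rewrite author's own statement) =====
-- stated objective: alternative
-- what changed: B replaces A's stateful forward propagation (carrying current_sector/current_subgroup through one interleaved loop) by a stateless per-column lookback: for each Claims/Liabilities column it searches backwards for the last non-empty sector cell and then the last non-empty subgroup cell since that sector change.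
import Mathlib
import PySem

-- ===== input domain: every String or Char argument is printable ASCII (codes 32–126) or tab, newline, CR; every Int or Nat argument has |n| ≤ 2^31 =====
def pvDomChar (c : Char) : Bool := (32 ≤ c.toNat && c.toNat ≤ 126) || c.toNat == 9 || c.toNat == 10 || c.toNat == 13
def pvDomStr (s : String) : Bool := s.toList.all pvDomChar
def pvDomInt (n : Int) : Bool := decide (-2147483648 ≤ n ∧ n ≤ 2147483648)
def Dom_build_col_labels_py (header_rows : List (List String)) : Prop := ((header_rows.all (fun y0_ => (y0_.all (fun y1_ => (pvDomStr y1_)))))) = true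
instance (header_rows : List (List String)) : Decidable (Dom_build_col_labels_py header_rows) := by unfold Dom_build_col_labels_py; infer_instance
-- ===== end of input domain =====

-- B replaces A's stateful forward propagation by a stateless per-column backward search
-- for the governing sector/subgroup cells (objective: alternative algorithm, not faster).

-- ===== PORT A =====
def build_col_labels_py (header_rows : List (List String)) : List (Option (String × String)) :=
  let sector_row := if 0 < header_rows.length then PySem.List.pyGetD header_rows 0 [] else []
  let subgroup_row := if 1 < header_rows.length then PySem.List.pyGetD header_rows 1 [] else []
  let position_row := if 2 < header_rows.length then PySem.List.pyGetD header_rows 2 [] else []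
  let max_len : Int := max (max (sector_row.length : Int) (subgroup_row.length : Int)) (position_row.length : Int)
  let st := (PySem.List.pyRange 1 max_len 1).foldl
    (fun (st : String × String × List (Option (String × String))) i =>
      let s := if i < (sector_row.length : Int) then PySem.Str.strip (PySem.List.pyGetD sector_row i "") else ""
      let sg := if i < (subgroup_row.length : Int) then PySem.Str.strip (PySem.List.pyGetD subgroup_row i "") else ""
      let p := if i < (position_row.length : Int) then PySem.Str.strip (PySem.List.pyGetD position_row i "") else ""
      let cs := if s ≠ "" then s else st.1
      let csg0 := if s ≠ "" then "" else st.2.1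
      let csg := if sg ≠ "" then sg else csg0
      let labels :=
        if p = "Claims" ∨ p = "Liabilities" then
          let sec := if csg ≠ "" then PySem.Str.stripChars (cs ++ " — " ++ csg) " —" else cs
          st.2.2 ++ [some (sec, p)]
        else st.2.2 ++ [none]
      (cs, csg, labels))
    ("", "", [])
  st.2.2

-- ===== PORT B =====
-- B helper: _cell(row, i)
def pvCell (row : List String) (i : Int) : String :=
  if 0 ≤ i ∧ i < (row.length : Int) then PySem.Str.strip (PySem.List.pyGetD row i "") else ""

-- B helper: _last_nonempty(row, hi, lo) = next((k for k in range(hi, lo-1, -1) if _cell(row,k)), None)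
def pvLastNonempty (row : List String) (hi lo : Int) : Option Int :=
  (PySem.List.pyRange hi (lo - 1) (-1)).find? (fun k => decide (pvCell row k ≠ ""))

-- B helper: label(i)
def pvLabelAt (sector_row subgroup_row position_row : List String) (i : Int) : Option (String × String) :=
  let p := pvCell position_row i
  if p = "Claims" ∨ p = "Liabilities" then
    let j? := pvLastNonempty sector_row i 1
    let cs := match j? with | some j => pvCell sector_row j | none => ""
    let lo := match j? with | some j => j | none => 1
    let k? := pvLastNonempty subgroup_row i lo
    let csg := match k? with | some k => pvCell subgroup_row k | none => ""
    let sec := if csg ≠ "" then PySem.Str.stripChars (cs ++ " — " ++ csg) " —" else cs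
    some (sec, p)
  else none

def build_col_labels_py_alt (header_rows : List (List String)) : List (Option (String × String)) :=
  let sector_row := if 0 < header_rows.length then PySem.List.pyGetD header_rows 0 [] else []
  let subgroup_row := if 1 < header_rows.length then PySem.List.pyGetD header_rows 1 [] else []
  let position_row := if 2 < header_rows.length then PySem.List.pyGetD header_rows 2 [] else []
  let max_len : Int := max (max (sector_row.length : Int) (subgroup_row.length : Int)) (position_row.length : Int)
  (PySem.List.pyRange 1 max_len 1).map (pvLabelAt sector_row subgroup_row position_row)

-- ===== PRECONDITION & SPEC =====
def Spec_build_col_labels_py (header_rows : List (List String)) (out : List (Option (String × String))) : Prop := out = build_col_labels_py_alt header_rows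
instance (header_rows : List (List String)) (out : List (Option (String × String))) : Decidable (Spec_build_col_labels_py header_rows out) := by unfold Spec_build_col_labels_py; infer_instance

-- ===== CLAIM (what is proved, stated in full; the proofs are below) =====
def Claim_equal_build_col_labels_py : Prop := ∀ (header_rows : List (List String)), Dom_build_col_labels_py header_rows → Spec_build_col_labels_py header_rows (build_col_labels_py header_rows)

-- ===== LEMMAS AND PROOFS =====

-- A's loop body, named for the proofs (identical to the lambda in build_col_labels_py).
def pvStepA (sector_row subgroup_row position_row : List String)
    (st : String × String × List (Option (String × String))) (i : Int) :
    String × String × List (Option (String × String)) :=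
  let s := if i < (sector_row.length : Int) then PySem.Str.strip (PySem.List.pyGetD sector_row i "") else ""
  let sg := if i < (subgroup_row.length : Int) then PySem.Str.strip (PySem.List.pyGetD subgroup_row i "") else ""
  let p := if i < (position_row.length : Int) then PySem.Str.strip (PySem.List.pyGetD position_row i "") else ""
  let cs := if s ≠ "" then s else st.1
  let csg0 := if s ≠ "" then "" else st.2.1
  let csg := if sg ≠ "" then sg else csg0
  let labels :=
    if p = "Claims" ∨ p = "Liabilities" then
      let sec := if csg ≠ "" then PySem.Str.stripChars (cs ++ " — " ++ csg) " —" else cs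
      st.2.2 ++ [some (sec, p)]
    else st.2.2 ++ [none]
  (cs, csg, labels)

-- resolved sector / lo-bound / subgroup visible at column i, as B computes them
def pvCS (sec : List String) (i : Int) : String :=
  match pvLastNonempty sec i 1 with | some j => pvCell sec j | none => ""

def pvLO (sec : List String) (i : Int) : Int :=
  match pvLastNonempty sec i 1 with | some j => j | none => 1

def pvCSG (sec sub : List String) (i : Int) : String :=
  match pvLastNonempty sub i (pvLO sec i) with | some k => pvCell sub k | none => ""

lemma pvCell_of_one_le (row : List String) (i : Int) (h : 1 ≤ i) :
    (if i < (row.length : Int) then PySem.Str.strip (PySem.List.pyGetD row i "") else "") = pvCell row i := by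
  by_cases hlt : i < (row.length : Int) <;>
    simp [pvCell, hlt, show (0:Int) ≤ i by omega]

lemma pvLN_succ (row : List String) (i lo : Int) (h : lo ≤ i) :
    pvLastNonempty row i lo =
      if pvCell row i ≠ "" then some i else pvLastNonempty row (i-1) lo := by
  unfold pvLastNonempty
  rw [PySem.List.pyRange_neg_one_cons (by omega : lo - 1 < i)]
  by_cases hc : pvCell row i = "" <;> simp [hc]

lemma pvLN_self_nil (row : List String) (i : Int) :
    pvLastNonempty row (i-1) i = none := by
  unfold pvLastNonempty
  rw [PySem.List.pyRange_neg_one_eq_nil (by omega)]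
  simp

lemma pvLO_le (sec : List String) (i : Int) (h0 : 0 ≤ i) : pvLO sec i ≤ i + 1 := by
  unfold pvLO
  cases hj : pvLastNonempty sec i 1 with
  | none => simp; omega
  | some j =>
      have hmem := List.mem_of_find?_eq_some hj
      have : j ∈ PySem.List.pyRange i (1-1) (-1) := hmem
      rw [show (1:Int) - 1 = 0 by norm_num] at this
      have := (PySem.List.mem_pyRange_neg_one).1 this
      simp; omega

lemma pvLO_pos (sec : List String) (i : Int) : 1 ≤ pvLO sec i := by
  unfold pvLO
  cases hj : pvLastNonempty sec i 1 with
  | none => simp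
  | some j =>
      have hmem := List.mem_of_find?_eq_some hj
      have : j ∈ PySem.List.pyRange i (1-1) (-1) := hmem
      rw [show (1:Int) - 1 = 0 by norm_num] at this
      have := (PySem.List.mem_pyRange_neg_one).1 this
      simp; omega

lemma pvCS_succ (sec : List String) (i : Int) (h : 1 ≤ i) :
    pvCS sec i = if pvCell sec i ≠ "" then pvCell sec i else pvCS sec (i-1) := by
  unfold pvCS
  rw [pvLN_succ sec i 1 h]
  by_cases hc : pvCell sec i = "" <;> simp [hc]

lemma pvLO_succ (sec : List String) (i : Int) (h : 1 ≤ i) :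
    pvLO sec i = if pvCell sec i ≠ "" then i else pvLO sec (i-1) := by
  unfold pvLO
  rw [pvLN_succ sec i 1 h]
  by_cases hc : pvCell sec i = "" <;> simp [hc]

lemma pvCSG_succ_reset (sec sub : List String) (i : Int) (h : 1 ≤ i)
    (hs : pvCell sec i ≠ "") :
    pvCSG sec sub i = if pvCell sub i ≠ "" then pvCell sub i else "" := by
  unfold pvCSG
  rw [pvLO_succ sec i h, if_pos hs, pvLN_succ sub i i le_rfl, pvLN_self_nil]
  by_cases hc : pvCell sub i = "" <;> simp [hc]

lemma pvCSG_succ_keep (sec sub : List String) (i : Int) (h : 1 ≤ i)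
    (hs : ¬ pvCell sec i ≠ "") :
    pvCSG sec sub i = if pvCell sub i ≠ "" then pvCell sub i else pvCSG sec sub (i-1) := by
  unfold pvCSG
  rw [pvLO_succ sec i h, if_neg hs]
  have hlo : pvLO sec (i-1) ≤ i := by
    have := pvLO_le sec (i-1) (by omega)
    omega
  rw [pvLN_succ sub i _ hlo]
  by_cases hc : pvCell sub i = "" <;> simp [hc]

lemma pvLabelAt_eq (sec sub pos : List String) (i : Int) :
    pvLabelAt sec sub pos i =
      if pvCell pos i = "Claims" ∨ pvCell pos i = "Liabilities" then
        some (if pvCSG sec sub i ≠ "" then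
                PySem.Str.stripChars (pvCS sec i ++ " — " ++ pvCSG sec sub i) " —"
              else pvCS sec i, pvCell pos i)
      else none := by
  unfold pvLabelAt pvCS pvCSG pvLO
  cases pvLastNonempty sec i 1 <;> simp only []

lemma pv_inv (sec sub pos : List String) : ∀ (m : Nat),
    (PySem.List.pyRange 1 (1 + (m:Int)) 1).foldl (pvStepA sec sub pos) ("", "", []) =
      (pvCS sec (m:Int), pvCSG sec sub (m:Int),
        (PySem.List.pyRange 1 (1 + (m:Int)) 1).map (pvLabelAt sec sub pos)) := by
  intro m
  induction m with
  | zero =>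
      rw [show (1:Int) + (0:Nat) = 1 by norm_num, PySem.List.pyRange_one_eq_nil le_rfl]
      have h1 : pvLastNonempty sec 0 1 = none := pvLN_self_nil sec 1
      have h2 : pvLastNonempty sub 0 (pvLO sec 0) = none := by
        have := pvLN_self_nil sub (pvLO sec 0)
        have hp := pvLO_pos sec 0
        unfold pvLastNonempty at *
        rw [PySem.List.pyRange_neg_one_eq_nil (by omega)]
        simp
      simp [pvCS, pvCSG, h1, h2]
  | succ m ih =>
      have hcast : (1:Int) + ((m+1 : Nat) : Int) = (1 + (m:Int)) + 1 := by push_cast; ring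
      rw [hcast, PySem.List.pyRange_one_succ_right (by omega : (1:Int) ≤ 1 + m),
        List.foldl_append, List.map_append, ih]
      have hi : (1:Int) ≤ 1 + (m:Int) := by omega
      set i : Int := 1 + (m:Int) with hidef
      have him : ((m+1 : Nat) : Int) = i := by omega
      rw [List.foldl_cons, List.foldl_nil, List.map_cons, List.map_nil, him]
      show pvStepA sec sub pos (pvCS sec (m:Int), pvCSG sec sub (m:Int),
            (PySem.List.pyRange 1 i 1).map (pvLabelAt sec sub pos)) i =
          (pvCS sec i, pvCSG sec sub i,
            (PySem.List.pyRange 1 i 1).map (pvLabelAt sec sub pos) ++ [pvLabelAt sec sub pos i])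
      have hm : (m:Int) = i - 1 := by omega
      unfold pvStepA
      rw [pvCell_of_one_le sec i hi, pvCell_of_one_le sub i hi, pvCell_of_one_le pos i hi,
        pvLabelAt_eq]
      simp only [hm]
      by_cases hs : pvCell sec i = ""
      · rw [pvCS_succ sec i hi, pvCSG_succ_keep sec sub i hi (by simp [hs])]
        by_cases hg : pvCell sub i = "" <;> simp [hs, hg] <;> split_ifs <;> rfl
      · rw [pvCS_succ sec i hi, pvCSG_succ_reset sec sub i hi hs]
        by_cases hg : pvCell sub i = "" <;> simp [hs, hg] <;> split_ifs <;> rfl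

lemma pv_main (sec sub pos : List String) (n : Int) :
    ((PySem.List.pyRange 1 n 1).foldl (pvStepA sec sub pos) ("", "", [])).2.2 =
      (PySem.List.pyRange 1 n 1).map (pvLabelAt sec sub pos) := by
  by_cases h : n ≤ 1
  · rw [PySem.List.pyRange_one_eq_nil h]
    simp
  · obtain ⟨m, hm⟩ : ∃ m : Nat, n = 1 + (m:Int) := ⟨(n-1).toNat, by omega⟩
    rw [hm, pv_inv sec sub pos m]

-- ===== VERDICT (by name: the statement is the Claim_ definition above) =====
theorem build_col_labels_py_spec : Claim_equal_build_col_labels_py := by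
  intro header_rows _
  unfold Spec_build_col_labels_py build_col_labels_py build_col_labels_py_alt
  exact pv_main _ _ _ _
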